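-- pv_equiv track=rewrite | github.com/AVUKU-PRAGATHESWARI/GeeksForGeeks | Minimum indexed character.py | minIndexChar
-- ===== SOURCE A (Python) =====
-- def minIndexChar(Str, pat):
--     #code here
--     mini = len(Str)
--     for i in pat:
--         if i in Str:
--             mini = min(mini,Str.index(i))
--     if mini == len(Str):
--         return -1
--     return mini
-- ===== SOURCE B (Python) =====
-- def minIndexChar(Str, pat):
--     chars = set(pat)
--     for i, c in enumerate(Str):
--         if c in chars:
--             return i
--     return -1
-- ===== Notes on version B (the rewrite author's own statement) =====
-- stated objective: faster
-- what changed: B inverts the traversal: instead of looping over pat and rescanning Str with 'in'/.index for each pattern character, it scans Str once left-to-right and returns the first index whose character is in set(pat), exiting early; no minimum accumulator or len(Str) sentinel.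
import Mathlib
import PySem

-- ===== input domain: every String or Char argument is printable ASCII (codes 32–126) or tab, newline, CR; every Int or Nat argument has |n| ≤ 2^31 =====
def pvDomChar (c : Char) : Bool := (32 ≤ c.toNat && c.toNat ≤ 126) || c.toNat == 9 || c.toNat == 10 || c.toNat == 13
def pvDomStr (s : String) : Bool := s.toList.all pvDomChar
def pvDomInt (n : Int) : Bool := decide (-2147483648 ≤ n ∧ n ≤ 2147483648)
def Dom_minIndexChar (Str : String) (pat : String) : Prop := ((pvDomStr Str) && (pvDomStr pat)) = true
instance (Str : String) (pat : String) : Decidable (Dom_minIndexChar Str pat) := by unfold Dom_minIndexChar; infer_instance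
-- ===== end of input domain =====

-- B inverts the traversal: instead of A's loop over pat with repeated Str scans and a
-- sentinel minimum, B scans Str once left-to-right and returns the first index whose
-- character lies in set(pat) (early exit, no minimum accumulator).

-- ===== PORT A =====
-- mini = len(Str); for i in pat: if i in Str: mini = min(mini, Str.index(i)); sentinel len(Str) → -1
def minIndexChar (Str : String) (pat : String) : Int :=
  let s := Str.toList
  let mini : Int := (s.length : Int)
  let mini := pat.toList.foldl (fun mini c =>
    if c ∈ s then min mini (((PySem.List.index? s c).getD 0 : Nat) : Int) else mini) mini
  if mini = (s.length : Int) then -1 else mini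

-- ===== PORT B =====
-- chars = set(pat); for i, c in enumerate(Str): if c in chars: return i; return -1
def scanFirstB (chars : PySem.Set Char) : List Char → Int → Int
  | [], _ => -1
  | c :: rest, i => if PySem.Set.contains chars c then i else scanFirstB chars rest (i + 1)

def minIndexChar_alt (Str : String) (pat : String) : Int :=
  scanFirstB (PySem.Set.ofList pat.toList) Str.toList 0

-- ===== PRECONDITION & SPEC =====
def Spec_minIndexChar (Str : String) (pat : String) (out : Int) : Prop := out = minIndexChar_alt Str pat
instance (Str : String) (pat : String) (out : Int) : Decidable (Spec_minIndexChar Str pat out) := by unfold Spec_minIndexChar; infer_instance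

-- ===== CLAIM (what is proved, stated in full; the proofs are below) =====
def Claim_equal_minIndexChar : Prop := ∀ (Str : String) (pat : String), Dom_minIndexChar Str pat → Spec_minIndexChar Str pat (minIndexChar Str pat)

-- ===== LEMMAS AND PROOFS =====

-- A's Nat-valued fold (the Int fold of the port is its cast; see aFold_cast)
def natStep (s : List Char) (m : Nat) (c : Char) : Nat :=
  match PySem.List.index? s c with
  | some j => min m j
  | none => m

-- A's Int fold equals the cast of the Nat fold
theorem aFold_cast (s : List Char) (pl : List Char) : ∀ (m : Nat),
    pl.foldl (fun mini c =>
      if c ∈ s then min mini (((PySem.List.index? s c).getD 0 : Nat) : Int) else mini) (m : Int)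
    = ((pl.foldl (natStep s) m : Nat) : Int) := by
  induction pl with
  | nil => intro m; rfl
  | cons c rest ih =>
    intro m
    simp only [List.foldl_cons]
    by_cases h : c ∈ s
    · obtain ⟨j, hj⟩ := Option.isSome_iff_exists.mp ((PySem.List.index?_isSome_iff s c).2 h)
      rw [show (if c ∈ s then min (m : Int) (((PySem.List.index? s c).getD 0 : Nat) : Int) else (m : Int))
            = ((min m j : Nat) : Int) by rw [if_pos h, hj, Nat.cast_min]; rfl]
      rw [ih, show natStep s m c = min m j by unfold natStep; rw [hj]]
    · have hn : PySem.List.index? s c = none := (PySem.List.index?_eq_none_iff s c).2 h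
      rw [if_neg h, ih, show natStep s m c = m by unfold natStep; rw [hn]]

-- each step of A's fold never increases the accumulator
theorem natFold_le (s : List Char) (pl : List Char) : ∀ (m : Nat),
    pl.foldl (natStep s) m ≤ m := by
  induction pl with
  | nil => intro m; exact le_refl m
  | cons c rest ih =>
    intro m
    refine le_trans (ih (natStep s m c)) ?_
    unfold natStep
    cases PySem.List.index? s c with
    | none => exact le_refl m
    | some j => exact min_le_left m j

-- if every index inserted by the fold is ≥ j, the fold stays ≥ j
theorem natFold_ge (s : List Char) (j : Nat) (pl : List Char)
    (hall : ∀ c ∈ pl, ∀ k, PySem.List.index? s c = some k → j ≤ k) :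
    ∀ (m : Nat), j ≤ m → j ≤ pl.foldl (natStep s) m := by
  induction pl with
  | nil => intro m hm; exact hm
  | cons c rest ih =>
    intro m hm
    refine ih (fun c' hc' k hk => hall c' (List.mem_cons_of_mem c hc') k hk) _ ?_
    unfold natStep
    cases hidx : PySem.List.index? s c with
    | none => exact hm
    | some k => exact le_min hm (hall c (List.mem_cons_self) k hidx)

-- if some c0 ∈ pl has first occurrence j, the fold ends ≤ j
theorem natFold_le_j (s : List Char) (j : Nat) (pl : List Char) (c0 : Char)
    (hc0 : c0 ∈ pl) (hidx : PySem.List.index? s c0 = some j) (m : Nat) :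
    pl.foldl (natStep s) m ≤ j := by
  obtain ⟨l1, l2, hsplit⟩ := List.append_of_mem hc0
  subst hsplit
  rw [List.foldl_append, List.foldl_cons]
  refine le_trans (natFold_le s l2 _) ?_
  unfold natStep
  rw [hidx]
  exact min_le_right _ j

-- the first occurrence of s[j] is j itself when no earlier position carries a pat character
theorem index?_getElem_self (s : List Char) (pl : List Char) (j : Nat) (hj : j < s.length)
    (hmem : s[j] ∈ pl) (hfirst : ∀ k (hk : k < j), s[k] ∉ pl) :
    PySem.List.index? s (s[j]) = some j := by
  rw [PySem.List.index?_eq_some_iff]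
  refine ⟨s.take j, s.drop (j + 1), ?_, ?_, ?_⟩
  · rw [List.getElem_cons_drop hj, List.take_append_drop]
  · simp [List.length_take, Nat.min_eq_left (le_of_lt hj)]
  · intro hmemtake
    obtain ⟨k, hk, hkeq⟩ := List.mem_take_iff_getElem.mp hmemtake
    exact hfirst k (lt_of_lt_of_le hk (min_le_left _ _)) (hkeq ▸ hmem)

-- B's scan in terms of findIdx? over the same predicate
theorem scanFirstB_eq (chars : PySem.Set Char) (s : List Char) : ∀ (i : Int),
    scanFirstB chars s i
    = match s.findIdx? (fun c => PySem.Set.contains chars c) with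
      | some j => i + (j : Int)
      | none => -1 := by
  induction s with
  | nil => intro i; rfl
  | cons c rest ih =>
    intro i
    by_cases h : c ∈ chars
    · simp [scanFirstB, List.findIdx?_cons, h]
    · rw [show scanFirstB chars (c :: rest) i = scanFirstB chars rest (i + 1) by
        simp [scanFirstB, h]]
      rw [ih (i + 1), List.findIdx?_cons]
      rw [if_neg (by simpa using h)]
      cases rest.findIdx? (fun c => PySem.Set.contains chars c) with
      | none => rfl
      | some j => simp only [Option.map_some]; push_cast; ring_nf

-- membership in set(pat) is membership in pat
theorem contains_ofList_eq (pl : List Char) :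
    (fun c => PySem.Set.contains (PySem.Set.ofList pl) c) = (fun c => decide (c ∈ pl)) := by
  funext c
  rcases h : PySem.Set.contains (PySem.Set.ofList pl) c with _ | _
  · have : c ∉ pl := fun hm => by
      have := (PySem.Set.contains_iff (PySem.Set.ofList pl) c).2 ((PySem.Set.mem_ofList pl c).2 hm)
      rw [h] at this; exact Bool.false_ne_true this
    simp [this]
  · have : c ∈ pl := (PySem.Set.mem_ofList pl c).1 ((PySem.Set.contains_iff (PySem.Set.ofList pl) c).1 h)
    simp [this]

theorem minIndexChar_eq (Str pat : String) : minIndexChar Str pat = minIndexChar_alt Str pat := by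
  unfold minIndexChar minIndexChar_alt
  dsimp only
  rw [scanFirstB_eq, contains_ofList_eq]
  rw [aFold_cast Str.toList pat.toList Str.toList.length]
  cases hf : Str.toList.findIdx? (fun c => decide (c ∈ pat.toList)) with
  | none =>
    have hnone : ∀ c ∈ pat.toList, PySem.List.index? Str.toList c = none := by
      intro c hc
      refine (PySem.List.index?_eq_none_iff _ c).2 (fun hcs => ?_)
      have := (List.findIdx?_eq_none_iff.mp hf) c hcs
      simp [hc] at this
    have hfold : pat.toList.foldl (natStep Str.toList) Str.toList.length = Str.toList.length := by
      have h1 := natFold_le Str.toList pat.toList Str.toList.length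
      have h2 := natFold_ge Str.toList Str.toList.length pat.toList
        (fun c hc k hk => by rw [hnone c hc] at hk; cases hk)
        Str.toList.length (le_refl _)
      exact le_antisymm h1 h2
    rw [hfold, if_pos rfl]
  | some j =>
    obtain ⟨hjlen, hpj, hbefore⟩ := List.findIdx?_eq_some_iff_getElem.mp hf
    have hmem : Str.toList[j] ∈ pat.toList := by simpa using hpj
    have hfirst : ∀ k (hk : k < j), Str.toList[k]'(lt_trans hk hjlen) ∉ pat.toList := by
      intro k hk hmemk
      have := hbefore k hk
      simp [hmemk] at this
    have hidx : PySem.List.index? Str.toList (Str.toList[j]) = some j :=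
      index?_getElem_self Str.toList pat.toList j hjlen hmem hfirst
    have hge : ∀ c ∈ pat.toList, ∀ k, PySem.List.index? Str.toList c = some k → j ≤ k := by
      intro c hc k hk
      obtain ⟨hklen, hkeq, -⟩ := PySem.List.getElem_of_index?_eq_some hk
      by_contra hlt
      exact hfirst k (Nat.lt_of_not_le hlt) (hkeq ▸ hc)
    have hfold : pat.toList.foldl (natStep Str.toList) Str.toList.length = j := by
      refine le_antisymm (natFold_le_j Str.toList j pat.toList (Str.toList[j]) hmem hidx _) ?_
      exact natFold_ge Str.toList j pat.toList hge Str.toList.length (le_of_lt hjlen)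
    rw [hfold]
    rw [if_neg (by exact_mod_cast Nat.ne_of_lt hjlen)]
    ring

-- ===== VERDICT (by name: the statement is the Claim_ definition above) =====
theorem minIndexChar_spec : Claim_equal_minIndexChar := by
  intro Str pat _
  unfold Spec_minIndexChar
  exact minIndexChar_eq Str pat
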